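-- pv_equiv track=rewrite | github.com/SouthGreenPlatform/VcfHunter | bin/vcf2struct.1.0.py | ident_autapo
-- ===== SOURCE A (Python) =====
-- def ident_autapo(DICO):
--
-- 	"""
-- 		Identification accession bearing autapomorphic variants (if at least 2 individuals have been genotyped)
--
-- 		:param DICO: A dictionary containing genotype for each accession at a given site
-- 		:type DICO: dictionary
-- 		:return: A dictionary (set()) containing accessions with autapomorphic variant
-- 		:rtype: dictionary
-- 	"""
--
-- 	dico_to_return = set()
-- 	for n in DICO:
-- 		for k in DICO[n]:
-- 			not_found = 1
-- 			not_all_empty = 0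
-- 			for z in DICO:
-- 				if z != n:
-- 					if k in DICO[z]:
-- 						not_found = 0
-- 					if len(DICO[z]) > 0:
-- 						not_all_empty = 1
-- 			if not_found and not_all_empty:
-- 				dico_to_return.add(n)
-- 	return dico_to_return
-- ===== SOURCE B (Python) =====
-- def ident_autapo(DICO):
-- 	nonempty = 0
-- 	owner = {}
-- 	for n in DICO:
-- 		alleles = DICO[n]
-- 		if alleles:
-- 			nonempty += 1
-- 		for k in alleles:
-- 			if k not in owner:
-- 				owner[k] = n
-- 			elif owner[k] != n:
-- 				owner[k] = None
-- 	dico_to_return = set()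
-- 	if nonempty >= 2:
-- 		for n in DICO:
-- 			if any(owner[k] == n for k in DICO[n]):
-- 				dico_to_return.add(n)
-- 	return dico_to_return
-- ===== Notes on version B (the rewrite author's own statement) =====
-- stated objective: faster
-- what changed: Replaces the per-accession-per-allele rescan of all other accessions with a single pass that builds an allele->unique-owner map and a count of non-empty accessions, then filters accessions in one more pass.
import Mathlib
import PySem

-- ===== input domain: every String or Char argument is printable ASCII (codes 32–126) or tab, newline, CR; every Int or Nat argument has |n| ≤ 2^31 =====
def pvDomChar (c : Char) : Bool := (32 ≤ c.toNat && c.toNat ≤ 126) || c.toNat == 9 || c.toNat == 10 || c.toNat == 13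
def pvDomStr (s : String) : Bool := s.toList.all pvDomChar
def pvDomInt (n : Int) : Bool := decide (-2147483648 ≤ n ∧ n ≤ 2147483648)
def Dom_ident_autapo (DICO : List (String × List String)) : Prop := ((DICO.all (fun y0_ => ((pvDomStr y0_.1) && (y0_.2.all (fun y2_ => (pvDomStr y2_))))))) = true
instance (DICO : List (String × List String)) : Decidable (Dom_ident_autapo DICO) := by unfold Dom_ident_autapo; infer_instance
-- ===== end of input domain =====

-- B replaces A's rescan of all other accessions per allele by one pass building an
-- allele->unique-owner map plus a count of non-empty accessions (objective: faster).

-- ===== PORT A =====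
-- literal transliteration of A: for each accession n and allele k, scan all other
-- accessions z maintaining not_found / not_all_empty flags, collecting n into a set.
def ident_autapo (DICO : List (String × List String)) : List String :=
  let d := PySem.Dict.ofList DICO
  d.keys.foldl (fun acc n =>
    (d.getD n []).foldl (fun acc k =>
      let st := d.keys.foldl (fun (st : Int × Int) z =>
        if z ≠ n then
          ((if k ∈ d.getD z [] then 0 else st.1),
           (if 0 < (d.getD z []).length then 1 else st.2))
        else st) ((1 : Int), (0 : Int))
      if st.1 ≠ 0 ∧ st.2 ≠ 0 then PySem.Set.add acc n else acc) acc)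
    PySem.Set.empty

-- ===== PORT B =====
-- literal transliteration of Source B: one pass builds (nonempty count, owner dict:
-- allele -> some owner | none once seen in two accessions), then one filtering pass.
def ident_autapo_alt (DICO : List (String × List String)) : List String :=
  let d := PySem.Dict.ofList DICO
  let st := d.keys.foldl (fun (st : Int × PySem.Dict String (Option String)) n =>
    let alleles := d.getD n []
    ((if alleles ≠ [] then st.1 + 1 else st.1),
     alleles.foldl (fun ow k =>
        if ow.contains k = false then ow.insert k (some n)
        else if ow.getD k none ≠ some n then ow.insert k none
        else ow) st.2)) ((0 : Int), PySem.Dict.empty)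
  if 2 ≤ st.1 then
    d.keys.foldl (fun res n =>
      if (d.getD n []).any (fun k => st.2.getD k none == some n) then PySem.Set.add res n
      else res) PySem.Set.empty
  else PySem.Set.empty

-- ===== PRECONDITION & SPEC =====
def Spec_ident_autapo (DICO : List (String × List String)) (out : List String) : Prop := out = ident_autapo_alt DICO
instance (DICO : List (String × List String)) (out : List String) : Decidable (Spec_ident_autapo DICO out) := by unfold Spec_ident_autapo; infer_instance

-- ===== CLAIM (what is proved, stated in full; the proofs are below) =====
def Claim_equal_ident_autapo : Prop := ∀ (DICO : List (String × List String)), Dom_ident_autapo DICO → Spec_ident_autapo DICO (ident_autapo DICO)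

-- ===== LEMMAS AND PROOFS =====

-- proof-side abstractions of the two port bodies over (keys, lookup)
def pvAbody (ks : List String) (v : String → List String) : List String :=
  ks.foldl (fun acc n =>
    (v n).foldl (fun acc k =>
      let st := ks.foldl (fun (st : Int × Int) z =>
        if z ≠ n then
          ((if k ∈ v z then 0 else st.1),
           (if 0 < (v z).length then 1 else st.2))
        else st) ((1 : Int), (0 : Int))
      if st.1 ≠ 0 ∧ st.2 ≠ 0 then PySem.Set.add acc n else acc) acc)
    PySem.Set.empty

def pvBbody (ks : List String) (v : String → List String) : List String :=
  let st := ks.foldl (fun (st : Int × PySem.Dict String (Option String)) n =>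
    ((if v n ≠ [] then st.1 + 1 else st.1),
     (v n).foldl (fun ow k =>
        if ow.contains k = false then ow.insert k (some n)
        else if ow.getD k none ≠ some n then ow.insert k none
        else ow) st.2)) ((0 : Int), PySem.Dict.empty)
  if 2 ≤ st.1 then
    ks.foldl (fun res n =>
      if (v n).any (fun k => st.2.getD k none == some n) then PySem.Set.add res n
      else res) PySem.Set.empty
  else PySem.Set.empty

theorem pvA_eq (DICO : List (String × List String)) :
    ident_autapo DICO
      = pvAbody (PySem.Dict.ofList DICO).keys (fun n => (PySem.Dict.ofList DICO).getD n []) := rfl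

theorem pvB_eq (DICO : List (String × List String)) :
    ident_autapo_alt DICO
      = pvBbody (PySem.Dict.ofList DICO).keys (fun n => (PySem.Dict.ofList DICO).getD n []) := rfl

-- "accession n bears an autapomorphic allele and someone else is genotyped" (A's condition)
def pvGood (ks : List String) (v : String → List String) (n : String) : Prop :=
  (∃ k ∈ v n, ¬ ∃ z ∈ ks, z ≠ n ∧ k ∈ v z) ∧ (∃ z ∈ ks, z ≠ n ∧ v z ≠ [])

-- value the owner dict stores for an allele whose holder list (in order) is l
def pvOwnerVal (l : List String) : Option (Option String) :=
  match l with
  | [] => none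
  | [z] => some (some z)
  | _ => some none

def pvUpd (o : Option (Option String)) (n : String) : Option String :=
  match o with
  | none => some n
  | some (some z) => if z = n then some n else none
  | some none => none

theorem innerA_state (v : String → List String) (n k : String) :
    ∀ (zs : List String) (a b : Int),
      zs.foldl (fun (st : Int × Int) z =>
        if z ≠ n then
          ((if k ∈ v z then 0 else st.1),
           (if 0 < (v z).length then 1 else st.2))
        else st) (a, b)
      = ((if ∃ z ∈ zs, z ≠ n ∧ k ∈ v z then (0 : Int) else a),
         (if ∃ z ∈ zs, z ≠ n ∧ v z ≠ [] then (1 : Int) else b)) := by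
  intro zs
  induction zs with
  | nil => simp
  | cons z zs ih =>
    intro a b
    simp only [List.foldl_cons]
    by_cases hz : z = n
    · simp only [hz, ne_eq, not_true_eq_false, if_false, ih]
      simp
    · simp only [ne_eq, hz, not_false_eq_true, if_true, ih]
      by_cases hk : k ∈ v z <;> by_cases he : v z = [] <;>
        simp_all [List.length_pos_iff]

theorem pvAddNotMem (s : List String) (n : String) (h : n ∉ s) :
    PySem.Set.add s n = s ++ [n] := by
  simp [PySem.Set.add]
  intro hc
  exact absurd hc h

theorem fold_add_exists (p : String → Prop) [DecidablePred p] (n : String) :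
    ∀ (l : List String) (acc : List String),
      l.foldl (fun acc k => if p k then PySem.Set.add acc n else acc) acc
      = if ∃ k ∈ l, p k then PySem.Set.add acc n else acc := by
  intro l
  induction l with
  | nil => simp
  | cons a l ih =>
    intro acc
    simp only [List.foldl_cons]
    by_cases ha : p a
    · simp only [ha, if_true, ih]
      by_cases h : ∃ k ∈ l, p k <;> simp_all
    · simp only [ha, if_false, ih]
      simp [ha]

theorem fold_add_filter (p : String → Prop) [DecidablePred p] :
    ∀ (ks acc : List String), (∀ n ∈ ks, n ∉ acc) → ks.Nodup →
      ks.foldl (fun acc n => if p n then PySem.Set.add acc n else acc) acc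
      = acc ++ ks.filter (fun n => decide (p n)) := by
  intro ks
  induction ks with
  | nil => simp
  | cons a ks ih =>
    intro acc hacc hnd
    simp only [List.foldl_cons, List.filter_cons]
    by_cases ha : p a
    · rw [if_pos ha, pvAddNotMem _ _ (hacc a (by simp)),
        ih (acc ++ [a]) ?_ hnd.of_cons]
      · simp [ha]
      · intro m hm
        simp only [List.mem_append, List.mem_singleton]
        rintro (h | rfl)
        · exact hacc m (by simp [hm]) h
        · exact (List.nodup_cons.mp hnd).1 hm
    · rw [if_neg ha, ih acc (fun m hm => hacc m (by simp [hm])) hnd.of_cons]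
      simp [ha]

theorem owner_step (n : String) (ow : PySem.Dict String (Option String)) (a k : String) :
    (if ow.contains a = false then ow.insert a (some n)
     else if ow.getD a none ≠ some n then ow.insert a none
     else ow).get? k
    = if k = a then some (pvUpd (ow.get? a) n) else ow.get? k := by
  rw [PySem.Dict.contains_eq_isSome_get?, PySem.Dict.getD_eq_get?_getD]
  rcases h : ow.get? a with _ | w
  · simp [PySem.Dict.get?_insert, pvUpd]
  · rcases w with _ | z
    · simp [PySem.Dict.get?_insert, pvUpd]
    · by_cases hz : z = n
      · simp only [hz, ne_eq, Option.isSome_some]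
        by_cases hk : k = a
        · subst hk; simp [pvUpd, h, hz]
        · simp [hk]
      · simp [PySem.Dict.get?_insert, pvUpd, hz]

theorem pvUpd_idem (o : Option (Option String)) (n : String) :
    pvUpd (some (pvUpd o n)) n = pvUpd o n := by
  rcases o with _ | w
  · simp [pvUpd]
  · rcases w with _ | z
    · simp [pvUpd]
    · by_cases hz : z = n <;> simp [pvUpd, hz]

theorem owner_inner (n : String) :
    ∀ (alleles : List String) (ow : PySem.Dict String (Option String)) (k : String),
      (alleles.foldl (fun ow k =>
        if ow.contains k = false then ow.insert k (some n)
        else if ow.getD k none ≠ some n then ow.insert k none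
        else ow) ow).get? k
      = if k ∈ alleles then some (pvUpd (ow.get? k) n) else ow.get? k := by
  intro alleles
  induction alleles with
  | nil => simp
  | cons a l ih =>
    intro ow k
    simp only [List.foldl_cons]
    rw [ih]
    by_cases hk : k = a
    · subst hk
      rw [owner_step]
      by_cases hm : k ∈ l <;> simp [hm, pvUpd_idem]
    · rw [owner_step]
      by_cases hm : k ∈ l <;> simp [hm, hk, List.mem_cons]

theorem ownerVal_append (g : List String) (n : String) (h : n ∉ g) :
    pvOwnerVal (g ++ [n]) = some (pvUpd (pvOwnerVal g) n) := by
  match g with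
  | [] => simp [pvOwnerVal, pvUpd]
  | [z] =>
    have hz : ¬ (z = n) := by simp at h; exact fun e => h e.symm
    simp [pvOwnerVal, pvUpd, hz]
  | z :: w :: rest => simp [pvOwnerVal, pvUpd]

theorem owner_outer (v : String → List String) :
    ∀ (ks : List String) (ow : PySem.Dict String (Option String)) (g : String → List String),
      (∀ k, ow.get? k = pvOwnerVal (g k)) → (∀ z ∈ ks, ∀ k, z ∉ g k) → ks.Nodup →
      ∀ k, (ks.foldl (fun ow n =>
              (v n).foldl (fun ow k =>
                if ow.contains k = false then ow.insert k (some n)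
                else if ow.getD k none ≠ some n then ow.insert k none
                else ow) ow) ow).get? k
            = pvOwnerVal (g k ++ ks.filter (fun z => decide (k ∈ v z))) := by
  intro ks
  induction ks with
  | nil => intro ow g hval _ _ k; simpa using hval k
  | cons n ks ih =>
    intro ow g hval hfresh hnd k
    simp only [List.foldl_cons]
    rw [ih _ (fun x => g x ++ if x ∈ v n then [n] else []) ?hv ?hf hnd.of_cons k]
    · simp only [List.filter_cons]
      by_cases hk : k ∈ v n <;> simp [hk, List.append_assoc]
    case hv =>
      intro x
      rw [owner_inner]
      by_cases hx : x ∈ v n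
      · rw [if_pos hx, hval x, ← ownerVal_append _ _ (hfresh n (by simp) x)]
        simp [hx]
      · simp [hx, hval x]
    case hf =>
      intro z hz x
      simp only [List.mem_append]
      rintro (h | h)
      · exact hfresh z (by simp [hz]) x h
      · have : z = n := by
          by_cases hx : x ∈ v n <;> simp_all
        exact (List.nodup_cons.mp hnd).1 (this ▸ hz)

theorem two_le_countP (ks : List String) (p : String → Bool) (n z : String) (hn : n ∈ ks) (hz : z ∈ ks) (hne : n ≠ z)
    (hpn : p n = true) (hpz : p z = true) : 2 ≤ ks.countP p := by
  rw [List.countP_eq_length_filter]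
  have hsub : [n, z] ⊆ ks.filter p := by
    intro x hx
    rcases List.mem_cons.mp hx with rfl | hx
    · exact List.mem_filter.mpr ⟨hn, hpn⟩
    · rcases List.mem_cons.mp hx with rfl | hx
      · exact List.mem_filter.mpr ⟨hz, hpz⟩
      · simp at hx
  have hnd2 : ([n, z] : List String).Nodup := by simp [hne]
  simpa using (hnd2.subperm hsub).length_le

theorem exists_other (ks : List String) (p : String → Bool) (hnd : ks.Nodup)
    (h2 : 2 ≤ ks.countP p) (n : String) : ∃ z ∈ ks, z ≠ n ∧ p z = true := by
  by_contra hc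
  push Not at hc
  have hsub : ks.filter p ⊆ [n] := by
    intro x hx
    rw [List.mem_filter] at hx
    by_cases hxn : x = n
    · simp [hxn]
    · exact absurd hx.2 (hc x hx.1 hxn)
  have := ((hnd.filter p).subperm hsub).length_le
  rw [List.countP_eq_length_filter] at h2
  simp at this; omega

theorem filter_eq_singleton (p : String → Bool) :
    ∀ (ks : List String), ks.Nodup → ∀ n, n ∈ ks → (∀ z ∈ ks, p z = true ↔ z = n) →
      ks.filter p = [n] := by
  intro ks
  induction ks with
  | nil => simp
  | cons a ks ih =>
    intro hnd n hn hp
    rcases List.mem_cons.mp hn with rfl | hn'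
    · rw [List.filter_cons_of_pos (by simp [hp n hn]), List.filter_eq_nil_iff.mpr]
      intro z hz hpz
      exact (List.nodup_cons.mp hnd).1 (((hp z (by simp [hz])).mp hpz) ▸ hz)
    · have hpa : ¬ p a = true := by
        intro hpa
        exact (List.nodup_cons.mp hnd).1 (((hp a (by simp)).mp hpa) ▸ hn')
      rw [List.filter_cons_of_neg (by simpa using hpa)]
      exact ih (List.nodup_cons.mp hnd).2 n hn' (fun z hz => hp z (by simp [hz]))

theorem pvCond_iff (ks : List String) (v : String → List String) (n : String) :
    (∃ k ∈ v n, (¬ ∃ z ∈ ks, z ≠ n ∧ k ∈ v z) ∧ (∃ z ∈ ks, z ≠ n ∧ v z ≠ []))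
      ↔ pvGood ks v n := by
  unfold pvGood
  constructor
  · rintro ⟨k, hk, h1, h2⟩; exact ⟨⟨k, hk, h1⟩, h2⟩
  · rintro ⟨⟨k, hk, h1⟩, h2⟩; exact ⟨k, hk, h1, h2⟩

theorem master (ks : List String) (v : String → List String) (hnd : ks.Nodup) :
    pvAbody ks v = pvBbody ks v := by
  letI : DecidablePred (pvGood ks v) := fun n => by unfold pvGood; infer_instance
  -- ===== A = ordered filter by pvGood =====
  have hA : pvAbody ks v = ks.filter (fun n => decide (pvGood ks v n)) := by
    unfold pvAbody
    have hfun : (fun (acc : List String) (n : String) =>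
        (v n).foldl (fun acc k =>
          let st := ks.foldl (fun (st : Int × Int) z =>
            if z ≠ n then
              ((if k ∈ v z then 0 else st.1),
               (if 0 < (v z).length then 1 else st.2))
            else st) ((1 : Int), (0 : Int))
          if st.1 ≠ 0 ∧ st.2 ≠ 0 then PySem.Set.add acc n else acc) acc)
        = (fun acc n => if pvGood ks v n then PySem.Set.add acc n else acc) := by
      funext acc n
      simp only [innerA_state v n]
      have h2 : (fun (acc : List String) (k : String) =>
          if (if ∃ z ∈ ks, z ≠ n ∧ k ∈ v z then (0 : Int) else 1) ≠ 0 ∧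
             (if ∃ z ∈ ks, z ≠ n ∧ v z ≠ [] then (1 : Int) else 0) ≠ 0
          then PySem.Set.add acc n else acc)
          = (fun acc k =>
            if (¬ (∃ z ∈ ks, z ≠ n ∧ k ∈ v z)) ∧ (∃ z ∈ ks, z ≠ n ∧ v z ≠ [])
            then PySem.Set.add acc n else acc) := by
        funext acc k
        by_cases h1 : ∃ z ∈ ks, z ≠ n ∧ k ∈ v z <;>
          by_cases hq : ∃ z ∈ ks, z ≠ n ∧ v z ≠ [] <;> simp [h1, hq]
      rw [h2, fold_add_exists, if_congr (pvCond_iff ks v n) rfl rfl]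
    rw [hfun, fold_add_filter (pvGood ks v) ks PySem.Set.empty
      (by intro m _; simp [PySem.Set.empty]) hnd]
    simp [PySem.Set.empty]
  -- ===== B = gated ordered filter =====
  set cnt := ks.foldl (fun (c : Int) n => if v n ≠ [] then c + 1 else c) 0 with hcnt
  set ow := ks.foldl (fun ow n =>
    (v n).foldl (fun ow k =>
      if ow.contains k = false then ow.insert k (some n)
      else if ow.getD k none ≠ some n then ow.insert k none
      else ow) ow) PySem.Dict.empty with how
  have hpair : ks.foldl (fun (st : Int × PySem.Dict String (Option String)) n =>
      ((if v n ≠ [] then st.1 + 1 else st.1),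
       (v n).foldl (fun ow k =>
          if ow.contains k = false then ow.insert k (some n)
          else if ow.getD k none ≠ some n then ow.insert k none
          else ow) st.2)) ((0 : Int), PySem.Dict.empty) = (cnt, ow) :=
    PySem.List.foldl_prod_mk (fun (c : Int) n => if v n ≠ [] then c + 1 else c)
      (fun ow n => (v n).foldl (fun ow k =>
          if ow.contains k = false then ow.insert k (some n)
          else if ow.getD k none ≠ some n then ow.insert k none
          else ow) ow) ks 0 PySem.Dict.empty
  have hB : pvBbody ks v = (if 2 ≤ cnt then
      ks.foldl (fun res n =>
        if (v n).any (fun k => ow.getD k none == some n) then PySem.Set.add res n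
        else res) PySem.Set.empty else PySem.Set.empty) := by
    simp only [pvBbody, hpair]
  have hcnt2 : cnt = ((ks.countP (fun n => decide (v n ≠ []))) : Int) := by
    rw [hcnt]
    have he : (fun (c : Int) (n : String) => if v n ≠ [] then c + 1 else c)
        = (fun c n => if (fun m => decide (v m ≠ [])) n = true then c + 1 else c) := by
      funext c m; simp
    rw [he, PySem.List.foldl_count_if]; simp
  have hOw : ∀ k, ow.get? k = pvOwnerVal (ks.filter (fun z => decide (k ∈ v z))) := by
    intro k
    rw [how]
    simpa using owner_outer v ks PySem.Dict.empty (fun _ => [])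
      (fun k => PySem.Dict.get?_empty k) (by simp) hnd k
  have hany : ∀ n, ((v n).any (fun k => ow.getD k none == some n))
      = decide (∃ k ∈ v n, ks.filter (fun z => decide (k ∈ v z)) = [n]) := by
    intro n
    rw [Bool.eq_iff_iff, List.any_eq_true]
    simp only [decide_eq_true_eq]
    constructor
    · rintro ⟨k, hk, hb⟩
      refine ⟨k, hk, ?_⟩
      rw [PySem.Dict.getD_eq_get?_getD, hOw k] at hb
      rcases hh : ks.filter (fun z => decide (k ∈ v z)) with _ | ⟨z, _ | ⟨w, rest⟩⟩ <;>
        rw [hh] at hb <;> simp [pvOwnerVal] at hb ⊢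
      exact hb
    · rintro ⟨k, hk, hfil⟩
      refine ⟨k, hk, ?_⟩
      rw [PySem.Dict.getD_eq_get?_getD, hOw k, hfil]
      simp [pvOwnerVal]
  rw [hA, hB]
  by_cases h2 : 2 ≤ cnt
  · rw [if_pos h2,
      fold_add_filter (fun n => ((v n).any (fun k => ow.getD k none == some n)) = true)
        ks PySem.Set.empty (by intro m _; simp [PySem.Set.empty]) hnd]
    simp only [PySem.Set.empty, List.nil_append]
    apply List.filter_congr
    intro n hn
    rw [Bool.decide_eq_true, hany n, decide_eq_decide]
    constructor
    · rintro ⟨⟨k, hk, huniq⟩, _⟩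
      refine ⟨k, hk, filter_eq_singleton _ ks hnd n hn ?_⟩
      intro z hz
      simp only [decide_eq_true_eq]
      constructor
      · intro hkz
        by_contra hzn
        exact huniq ⟨z, hz, hzn, hkz⟩
      · rintro rfl; exact hk
    · rintro ⟨k, hk, hfil⟩
      refine ⟨⟨k, hk, ?_⟩, ?_⟩
      · rintro ⟨z, hz, hzn, hkz⟩
        have hmem : z ∈ ks.filter (fun z => decide (k ∈ v z)) :=
          List.mem_filter.mpr ⟨hz, by simp [hkz]⟩
        rw [hfil] at hmem
        exact hzn (by simpa using hmem)
      · have h2' : 2 ≤ ks.countP (fun m => decide (v m ≠ [])) := by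
          rw [hcnt2] at h2; exact_mod_cast h2
        obtain ⟨z, hz, hzn, hpz⟩ := exists_other ks _ hnd h2' n
        exact ⟨z, hz, hzn, by simpa using hpz⟩
  · rw [if_neg h2]
    rw [show (PySem.Set.empty : List String) = [] from rfl]
    rw [List.filter_eq_nil_iff.mpr]
    intro n hn hg
    simp only [decide_eq_true_eq] at hg
    obtain ⟨⟨k, hk, _⟩, z, hz, hzn, hvz⟩ := hg
    have hvn : v n ≠ [] := fun e => by simp [e] at hk
    apply h2
    rw [hcnt2]
    exact_mod_cast two_le_countP ks _ n z hn hz (fun e => hzn e.symm)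
      (by simpa using hvn) (by simpa using hvz)

-- ===== VERDICT (by name: the statement is the Claim_ definition above) =====
theorem ident_autapo_spec : Claim_equal_ident_autapo := by
  intro DICO _
  unfold Spec_ident_autapo
  rw [pvA_eq, pvB_eq]
  exact master _ _ (PySem.Dict.nodup_keys_ofList DICO)
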